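-- pv_equiv track=rewrite | github.com/sulejmanhoxha/strukture-podataka | kolokvijum_prosle_godine.py | nadi_veliko_slovo_poslednju
-- ===== SOURCE A (Python) =====
-- def nadi_veliko_slovo_poslednju(string: str):
--     if len(string) == 0:
--         return "Recenica nema veliko slovo"
--
--     slovo = string[-1]
--
--     if slovo.isupper():
--         return slovo
--
--     else:
--         return nadi_veliko_slovo_poslednju(string[:-1])
-- ===== SOURCE B (Python) =====
-- def nadi_veliko_slovo_poslednju(string: str):
--     last = None
--     for c in string:
--         if c.isupper():
--             last = c
--     if last is None:
--         return "Recenica nema veliko slovo"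
--     return last
-- ===== Notes on version B (the rewrite author's own statement) =====
-- stated objective: faster
-- what changed: Replaces A's backward tail recursion on string[:-1] (which copies a shrinking slice at every step) with a single forward loop that keeps the most recent uppercase character seen.
import Mathlib
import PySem

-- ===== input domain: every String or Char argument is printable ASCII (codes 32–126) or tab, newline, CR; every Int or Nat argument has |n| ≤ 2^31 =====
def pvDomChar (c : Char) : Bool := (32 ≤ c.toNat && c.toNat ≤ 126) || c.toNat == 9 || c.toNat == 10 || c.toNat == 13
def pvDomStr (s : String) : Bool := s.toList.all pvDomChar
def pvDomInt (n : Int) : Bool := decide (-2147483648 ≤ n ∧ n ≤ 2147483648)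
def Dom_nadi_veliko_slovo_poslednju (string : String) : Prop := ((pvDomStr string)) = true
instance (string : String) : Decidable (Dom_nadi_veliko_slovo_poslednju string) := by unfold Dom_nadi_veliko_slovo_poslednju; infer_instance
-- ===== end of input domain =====

-- B replaces A's backward tail recursion on string[:-1] with one forward pass holding the last uppercase seen ("simpler").


-- ===== PORT A =====
-- A's recursion over the string; string[-1] = getLast (nonemptiness just checked), string[:-1] = dropLast (exact for nonempty lists).
def pvGoA (l : List Char) : String :=
  if h : l = [] then "Recenica nema veliko slovo"
  else
    let slovo := l.getLast h
    if PySem.Chars.isupper slovo then String.ofList [slovo]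
    else pvGoA l.dropLast
termination_by l.length
decreasing_by
  have : l ≠ [] := h
  cases l with
  | nil => simp at this
  | cons a t => simp [List.length_dropLast]

def nadi_veliko_slovo_poslednju (string : String) : String := pvGoA string.toList

-- ===== PORT B =====
def nadi_veliko_slovo_poslednju_alt (string : String) : String :=
  match string.toList.foldl (fun acc c => if PySem.Chars.isupper c then some c else acc) (none : Option Char) with
  | none => "Recenica nema veliko slovo"
  | some c => String.ofList [c]

-- ===== PRECONDITION & SPEC =====
def Spec_nadi_veliko_slovo_poslednju (string : String) (out : String) : Prop := out = nadi_veliko_slovo_poslednju_alt string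
instance (string : String) (out : String) : Decidable (Spec_nadi_veliko_slovo_poslednju string out) := by unfold Spec_nadi_veliko_slovo_poslednju; infer_instance

-- ===== CLAIM (what is proved, stated in full; the proofs are below) =====
def Claim_equal_nadi_veliko_slovo_poslednju : Prop := ∀ (string : String), Dom_nadi_veliko_slovo_poslednju string → Spec_nadi_veliko_slovo_poslednju string (nadi_veliko_slovo_poslednju string)

-- ===== LEMMAS AND PROOFS =====
theorem pvGoA_eq_fold (l : List Char) :
    pvGoA l = (match l.foldl (fun acc c => if PySem.Chars.isupper c then some c else acc) (none : Option Char) with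
               | none => "Recenica nema veliko slovo"
               | some c => String.ofList [c]) := by
  induction l using List.reverseRecOn with
  | nil => simp [pvGoA]
  | append_singleton l c ih =>
    rw [pvGoA]
    have hne : l ++ [c] ≠ [] := by simp
    by_cases h : PySem.Chars.isupper c = true
    · simp [hne, h]
    · simp [hne, List.foldl_append, h, ih]

-- ===== VERDICT (by name: the statement is the Claim_ definition above) =====
theorem nadi_veliko_slovo_poslednju_spec : Claim_equal_nadi_veliko_slovo_poslednju := by
  intro s _
  unfold Spec_nadi_veliko_slovo_poslednju nadi_veliko_slovo_poslednju nadi_veliko_slovo_poslednju_alt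
  exact pvGoA_eq_fold s.toList
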